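-- pv_equiv track=rewrite | github.com/edifff/python | Tinkoff/Kontest2/H.py | max_sum_times_min
-- ===== SOURCE A (Python) =====
-- from collections import deque
--
-- def max_sum_times_min(n, ls):
--     stack = deque()
--     left = [-1] * n
--     right = [n] * n
--     pre_sum = [0] * n
--     pre_sum[0] = ls[0]
--     for i in range(1, n):
--         pre_sum[i] = pre_sum[i - 1]+ls[i]
--
--     for i in range(n):
--         while stack and ls[stack[-1]] >= ls[i]:
--             stack.pop()
--         if stack:
--             left[i] = stack[-1]
--         stack.append(i)
--
--     stack.clear()
--
--     for i in range(n - 1, -1, -1):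
--         while stack and ls[stack[-1]] >= ls[i]:
--             stack.pop()
--         if stack:
--             right[i] = stack[-1]
--         stack.append(i)
--
--     max_product = float('-inf')
--
--     for i in range(n):
--         if left[i] == -1:
--             sum_sublsay = pre_sum[right[i] - 1]
--         else:
--             sum_sublsay = pre_sum[right[i] - 1] - pre_sum[left[i]]
--         max_product = max(max_product, ls[i] * sum_sublsay)
--
--     return max_product
-- ===== SOURCE B (Python) =====
-- def max_sum_times_min(n, ls):
--     # For each i, find the nearest strictly-smaller neighbours by direct scanning
--     # (no monotonic stacks); prefix sums built with a running accumulator.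
--     pre = []
--     acc = 0
--     for v in ls[:n]:
--         acc += v
--         pre.append(acc)
--     best = None
--     for i in range(n):
--         x = ls[i]
--         l = i - 1
--         while l >= 0 and ls[l] >= x:
--             l -= 1
--         r = i + 1
--         while r < n and ls[r] >= x:
--             r += 1
--         s = pre[r - 1] - (pre[l] if l >= 0 else 0)
--         cand = x * s
--         if best is None or cand > best:
--             best = cand
--     return best
-- ===== Notes on version B (the rewrite author's own statement) =====
-- stated objective: simpler
-- what changed: The two monotonic-stack passes and the precomputed left/right boundary arrays are replaced by a single loop that, for each element, finds its nearest strictly-smaller neighbours by direct backward/forward scans, with prefix sums kept by a running accumulator.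
import Mathlib
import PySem

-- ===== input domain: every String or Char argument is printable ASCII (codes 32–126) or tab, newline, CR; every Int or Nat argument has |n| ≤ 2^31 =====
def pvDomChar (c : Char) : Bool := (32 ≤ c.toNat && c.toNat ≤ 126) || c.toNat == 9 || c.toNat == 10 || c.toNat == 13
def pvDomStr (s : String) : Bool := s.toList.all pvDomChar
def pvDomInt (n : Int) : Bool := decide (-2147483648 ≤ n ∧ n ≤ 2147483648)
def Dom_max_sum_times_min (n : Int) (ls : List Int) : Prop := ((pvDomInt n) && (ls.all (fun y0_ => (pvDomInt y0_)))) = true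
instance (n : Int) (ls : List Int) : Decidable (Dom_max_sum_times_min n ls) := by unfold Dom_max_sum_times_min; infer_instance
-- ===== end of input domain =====

-- B replaces A's two monotonic-stack passes by per-element nearest-smaller scans (no stacks, no boundary arrays); return value proved equal on Pre_ (A raises IndexError outside it).


-- ===== PORT A =====
-- 'while stack and ls[stack[-1]] >= ls[i]: stack.pop()'  (the deque is kept head-first: head = top,
-- so append is cons, stack[-1] is the head, pop drops the head)
def pvPopGE (ls : List Int) (x : Int) : List Int → List Int
  | [] => []
  | t :: rest => if PySem.List.pyGetD ls t 0 ≥ x then pvPopGE ls x rest else t :: rest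

def max_sum_times_min (n : Int) (ls : List Int) : Int :=
  let left0 : List Int := List.replicate n.toNat (-1)
  let right0 : List Int := List.replicate n.toNat n
  -- pre_sum = [0]*n; pre_sum[0] = ls[0]; for i in range(1, n): pre_sum[i] = pre_sum[i-1]+ls[i]
  let pre0 : List Int := PySem.List.pySetD (List.replicate n.toNat 0) 0 (PySem.List.pyGetD ls 0 0)
  let pre := (PySem.List.pyRange 1 n 1).foldl
      (fun ps i => PySem.List.pySetD ps i (PySem.List.pyGetD ps (i - 1) 0 + PySem.List.pyGetD ls i 0)) pre0
  -- first stack pass: 'if stack: left[i] = stack[-1]; stack.append(i)'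
  let lp := (PySem.List.pyRange 0 n 1).foldl
      (fun (st : List Int × List Int) (i : Int) =>
        (if pvPopGE ls (PySem.List.pyGetD ls i 0) st.2 = [] then st.1
         else PySem.List.pySetD st.1 i ((pvPopGE ls (PySem.List.pyGetD ls i 0) st.2).headD 0),
         i :: pvPopGE ls (PySem.List.pyGetD ls i 0) st.2)) (left0, [])
  let left := lp.1
  -- second stack pass, for i in range(n-1, -1, -1)
  let rp := (PySem.List.pyRange (n - 1) (-1) (-1)).foldl
      (fun (st : List Int × List Int) (i : Int) =>
        (if pvPopGE ls (PySem.List.pyGetD ls i 0) st.2 = [] then st.1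
         else PySem.List.pySetD st.1 i ((pvPopGE ls (PySem.List.pyGetD ls i 0) st.2).headD 0),
         i :: pvPopGE ls (PySem.List.pyGetD ls i 0) st.2)) (right0, [])
  let right := rp.1
  -- max_product = float('-inf') modelled as none; max(-inf, x) = x
  let res := (PySem.List.pyRange 0 n 1).foldl
      (fun (mp : Option Int) i =>
        let s := if PySem.List.pyGetD left i 0 = -1
          then PySem.List.pyGetD pre (PySem.List.pyGetD right i 0 - 1) 0
          else PySem.List.pyGetD pre (PySem.List.pyGetD right i 0 - 1) 0 - PySem.List.pyGetD pre (PySem.List.pyGetD left i 0) 0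
        match mp with
        | none => some (PySem.List.pyGetD ls i 0 * s)
        | some m => some (max m (PySem.List.pyGetD ls i 0 * s))) none
  res.getD 0

-- ===== PORT B =====
-- 'l = i - 1; while l >= 0 and ls[l] >= x: l -= 1'  (the argument k stands for l + 1)
def pvScanL (ls : List Int) (x : Int) : Nat → Int
  | 0 => -1
  | k + 1 => if PySem.List.pyGetD ls (k : Int) 0 ≥ x then pvScanL ls x k else (k : Int)

-- 'r = i + 1; while r < n and ls[r] >= x: r += 1'
def pvScanR (ls : List Int) (x n r : Int) : Int :=
  if r < n then (if PySem.List.pyGetD ls r 0 ≥ x then pvScanR ls x n (r + 1) else r) else r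
termination_by (n - r).toNat
decreasing_by omega

def max_sum_times_min_alt (n : Int) (ls : List Int) : Int :=
  -- pre = []; acc = 0; for v in ls[:n]: acc += v; pre.append(acc)
  let pre := ((PySem.List.slice ls none (some n)).foldl
      (fun (st : List Int × Int) v => (st.1 ++ [st.2 + v], st.2 + v)) (([] : List Int), 0)).1
  let best := (PySem.List.pyRange 0 n 1).foldl
      (fun (best : Option Int) i =>
        let x := PySem.List.pyGetD ls i 0
        let l := pvScanL ls x i.toNat
        let r := pvScanR ls x n (i + 1)
        let s := PySem.List.pyGetD pre (r - 1) 0 - (if l ≥ 0 then PySem.List.pyGetD pre l 0 else 0)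
        let cand := x * s
        match best with
        | none => some cand
        | some b => some (if cand > b then cand else b)) none
  best.getD 0

-- ===== PRECONDITION & SPEC =====
-- Pre_ excludes exactly the inputs where A raises IndexError: n < 1 ('pre_sum[0] = ls[0]' on the
-- empty list built by [0]*n) and n > len(ls) (ls[i] out of range in the loops).
def Pre_max_sum_times_min (n : Int) (ls : List Int) : Prop := 1 ≤ n ∧ n ≤ ls.length
instance (n : Int) (ls : List Int) : Decidable (Pre_max_sum_times_min n ls) := by unfold Pre_max_sum_times_min; infer_instance
def pvWitness_max_sum_times_min : Int × List Int := (3, [2, -1, 4])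

def Spec_max_sum_times_min (n : Int) (ls : List Int) (out : Int) : Prop := out = max_sum_times_min_alt n ls
instance (n : Int) (ls : List Int) (out : Int) : Decidable (Spec_max_sum_times_min n ls out) := by unfold Spec_max_sum_times_min; infer_instance

-- ===== CLAIM (what is proved, stated in full; the proofs are below) =====
def Claim_equal_max_sum_times_min : Prop := ∀ (n : Int) (ls : List Int), Dom_max_sum_times_min n ls → Pre_max_sum_times_min n ls → Spec_max_sum_times_min n ls (max_sum_times_min n ls)

-- ===== LEMMAS AND PROOFS =====

-- the (zeta-reduced) body of A's two stack loops, named for the proofs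
def pvStackStep (ls : List Int) (st : List Int × List Int) (i : Int) : List Int × List Int :=
  (if pvPopGE ls (PySem.List.pyGetD ls i 0) st.2 = [] then st.1
   else PySem.List.pySetD st.1 i ((pvPopGE ls (PySem.List.pyGetD ls i 0) st.2).headD 0),
   i :: pvPopGE ls (PySem.List.pyGetD ls i 0) st.2)

-- popping with a lower threshold after a higher one is popping with the lower one
lemma pvPopGE_popGE (ls : List Int) {x y : Int} (h : x ≤ y) :
    ∀ s : List Int, pvPopGE ls x (pvPopGE ls y s) = pvPopGE ls x s := by
  intro s
  induction s with
  | nil => simp [pvPopGE]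
  | cons t rest ih =>
    by_cases hy : PySem.List.pyGetD ls t 0 ≥ y
    · have hx : PySem.List.pyGetD ls t 0 ≥ x := le_trans h hy
      simp only [pvPopGE]
      rw [if_pos hy, ih, if_pos hx]
    · simp only [pvPopGE]
      rw [if_neg hy]
      conv_lhs => rw [pvPopGE]

lemma pvScanL_sign (ls : List Int) (x : Int) :
    ∀ k : Nat, pvScanL ls x k = -1 ∨ 0 ≤ pvScanL ls x k := by
  intro k
  induction k with
  | zero => left; rfl
  | succ k ih =>
    simp only [pvScanL]
    by_cases hk : PySem.List.pyGetD ls (k : Int) 0 ≥ x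
    · rw [if_pos hk]; exact ih
    · rw [if_neg hk]; right; exact Int.natCast_nonneg k

lemma pvHeadDNe {s : List Int} (h : s ≠ []) (d1 d2 : Int) : s.headD d1 = s.headD d2 := by
  cases s with
  | nil => exact absurd rfl h
  | cons a t => rfl

-- a list characterised pointwise by getD is a map over range
lemma pvListEqMapRange {m : Nat} (xs : List Int) (f : Nat → Int)
    (hlen : xs.length = m) (h : ∀ k, k < m → xs.getD k 0 = f k) :
    xs = (List.range m).map f := by
  apply List.ext_getElem (by simp [hlen])
  intro i h1 h2
  have := h i (by omega)
  rw [List.getD_eq_getElem _ _ h1] at this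
  simpa using this

lemma pvTakeSuccSum (ls : List Int) (k : Nat) (h : k < ls.length) :
    (ls.take (k + 1)).sum = (ls.take k).sum + ls.getD k 0 := by
  rw [List.getD_eq_getElem _ _ h]
  exact List.sum_take_succ ls k h

-- ---- A's prefix-sum loop ----
lemma pvPrePass (ls : List Int) (n : Int) (hlen : n ≤ (ls.length : Int)) :
    ∀ (d : Nat) (a : Int) (ps : List Int),
      (n - a).toNat = d → 1 ≤ a → a ≤ n → ps.length = n.toNat →
      (∀ k : Nat, k < n.toNat → ps.getD k 0 = if (k : Int) < a then (ls.take (k + 1)).sum else 0) →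
      (((PySem.List.pyRange a n 1).foldl
          (fun ps i => PySem.List.pySetD ps i (PySem.List.pyGetD ps (i - 1) 0 + PySem.List.pyGetD ls i 0)) ps).length = n.toNat ∧
       ∀ k : Nat, k < n.toNat →
        ((PySem.List.pyRange a n 1).foldl
          (fun ps i => PySem.List.pySetD ps i (PySem.List.pyGetD ps (i - 1) 0 + PySem.List.pyGetD ls i 0)) ps).getD k 0
          = (ls.take (k + 1)).sum) := by
  intro d
  induction d with
  | zero =>
    intro a ps hd ha1 ha2 hl hp
    have : a = n := by omega
    subst this
    rw [PySem.List.pyRange_one_eq_nil le_rfl]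
    refine ⟨hl, ?_⟩
    intro k hk
    have := hp k hk
    rwa [if_pos (by omega : (k : Int) < a)] at this
  | succ d ih =>
    intro a ps hd ha1 ha2 hl hp
    have han : a < n := by omega
    rw [PySem.List.pyRange_one_cons han, List.foldl_cons]
    apply ih (a + 1) _ (by omega) (by omega) (by omega)
    · rw [PySem.List.length_pySetD]; exact hl
    · intro k hk
      rw [PySem.List.pySetD_of_nonneg _ _ (by omega)]
      have hkl : k < ps.length := by omega
      by_cases hka : k = a.toNat
      · rw [hka]
        rw [List.getD_eq_getElem _ _ (by simp; omega), List.getElem_set, if_pos rfl]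
        have h1 : PySem.List.pyGetD ps (a - 1) 0 = (ls.take ((a - 1).toNat + 1)).sum := by
          rw [PySem.List.pyGetD_of_nonneg _ _ (by omega : (0:Int) ≤ a - 1)]
          have := hp (a - 1).toNat (by omega)
          rwa [if_pos (by omega : (((a - 1).toNat : Nat) : Int) < a)] at this
        have h2 : PySem.List.pyGetD ls a 0 = ls.getD a.toNat 0 :=
          PySem.List.pyGetD_of_nonneg _ _ (by omega)
        rw [h1, h2, show (a - 1).toNat + 1 = a.toNat by omega,
          if_pos (by omega : ((a.toNat : Nat) : Int) < a + 1)]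
        exact (pvTakeSuccSum ls a.toNat (by omega)).symm
      · rw [List.getD_eq_getElem _ _ (by simpa [List.length_set] using hkl), List.getElem_set,
          if_neg (by omega)]
        have := hp k hk
        rw [List.getD_eq_getElem _ _ hkl] at this
        rw [this]
        by_cases hka' : (k : Int) < a
        · rw [if_pos hka', if_pos (by omega)]
        · rw [if_neg hka', if_neg (by omega)]

-- ---- B's prefix-sum loop ----
lemma pvFoldB (xs : List Int) : ∀ (l0 : List Int) (s0 : Int),
    xs.foldl (fun (st : List Int × Int) v => (st.1 ++ [st.2 + v], st.2 + v)) (l0, s0)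
      = (l0 ++ (List.range xs.length).map (fun k => s0 + (xs.take (k + 1)).sum), s0 + xs.sum) := by
  induction xs with
  | nil => intro l0 s0; simp
  | cons v t ih =>
    intro l0 s0
    rw [List.foldl_cons, ih]
    rw [Prod.mk.injEq]
    constructor
    · simp [List.range_succ_eq_map, List.map_map, Function.comp_def, add_assoc]
    · simp [add_assoc]

-- ---- the two stack passes ----
lemma pvLeftPass (ls : List Int) (n : Int) :
    ∀ (d : Nat) (a : Int) (p : List Int × List Int),
      (n - a).toNat = d → 0 ≤ a → a ≤ n → p.1.length = n.toNat →
      (∀ x : Int, (pvPopGE ls x p.2).headD (-1) = pvScanL ls x a.toNat) →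
      (∀ k : Nat, k < n.toNat →
        p.1.getD k 0 = if (k : Int) < a then pvScanL ls (PySem.List.pyGetD ls (k : Int) 0) k else -1) →
      (((PySem.List.pyRange a n 1).foldl (pvStackStep ls) p).1.length = n.toNat ∧
       ∀ k : Nat, k < n.toNat →
        (((PySem.List.pyRange a n 1).foldl (pvStackStep ls) p).1).getD k 0
          = pvScanL ls (PySem.List.pyGetD ls (k : Int) 0) k) := by
  intro d
  induction d with
  | zero =>
    intro a p hd ha0 han hl hS hp
    have : a = n := by omega
    subst this
    rw [PySem.List.pyRange_one_eq_nil le_rfl]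
    refine ⟨hl, ?_⟩
    intro k hk
    have := hp k hk
    rwa [if_pos (by omega : (k : Int) < a)] at this
  | succ d ih =>
    intro a p hd ha0 han hl hS hp
    have han' : a < n := by omega
    rw [PySem.List.pyRange_one_cons han', List.foldl_cons]
    have hcast : ((a.toNat : Nat) : Int) = a := by omega
    apply ih (a + 1) _ (by omega) (by omega) (by omega)
    · -- length preserved
      simp only [pvStackStep]
      by_cases hemp : pvPopGE ls (PySem.List.pyGetD ls a 0) p.2 = []
      · rw [if_pos hemp]; exact hl
      · rw [if_neg hemp, PySem.List.length_pySetD]; exact hl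
    · -- stack invariant at a + 1
      intro x
      have hto : (a + 1).toNat = a.toNat + 1 := by omega
      rw [hto]
      simp only [pvStackStep, pvScanL, hcast]
      by_cases hxy : PySem.List.pyGetD ls a 0 ≥ x
      · rw [if_pos hxy]
        show (pvPopGE ls x (a :: pvPopGE ls (PySem.List.pyGetD ls a 0) p.2)).headD (-1) = _
        rw [pvPopGE, if_pos hxy, pvPopGE_popGE ls hxy]
        exact hS x
      · rw [if_neg hxy]
        show (pvPopGE ls x (a :: pvPopGE ls (PySem.List.pyGetD ls a 0) p.2)).headD (-1) = a
        rw [pvPopGE, if_neg hxy]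
        rfl
    · -- array invariant at a + 1
      intro k hk
      simp only [pvStackStep]
      by_cases hemp : pvPopGE ls (PySem.List.pyGetD ls a 0) p.2 = []
      · rw [if_pos hemp]
        have hsc : pvScanL ls (PySem.List.pyGetD ls a 0) a.toNat = -1 := by
          rw [← hS (PySem.List.pyGetD ls a 0), hemp]; rfl
        by_cases hka : k = a.toNat
        · rw [hka]
          have := hp a.toNat (by omega)
          rw [if_neg (by omega : ¬ ((a.toNat : Nat) : Int) < a)] at this
          rw [this, if_pos (by omega : ((a.toNat : Nat) : Int) < a + 1), hcast, hsc]
        · have := hp k hk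
          by_cases hka' : (k : Int) < a
          · rw [if_pos hka'] at this; rw [this, if_pos (by omega)]
          · rw [if_neg hka'] at this; rw [this, if_neg (by omega)]
      · rw [if_neg hemp, PySem.List.pySetD_of_nonneg _ _ ha0]
        have hkl : k < p.1.length := by omega
        by_cases hka : k = a.toNat
        · rw [hka]
          rw [List.getD_eq_getElem _ _ (by simp; omega), List.getElem_set, if_pos rfl,
            if_pos (by omega : ((a.toNat : Nat) : Int) < a + 1), hcast,
            pvHeadDNe hemp 0 (-1), hS (PySem.List.pyGetD ls a 0)]
        · rw [List.getD_eq_getElem _ _ (by simpa [List.length_set] using hkl), List.getElem_set,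
            if_neg (by omega)]
          have := hp k hk
          rw [List.getD_eq_getElem _ _ hkl] at this
          rw [this]
          by_cases hka' : (k : Int) < a
          · rw [if_pos hka', if_pos (by omega)]
          · rw [if_neg hka', if_neg (by omega)]

lemma pvRightPass (ls : List Int) (n : Int) :
    ∀ (d : Nat) (a : Int) (p : List Int × List Int),
      (a + 1).toNat = d → -1 ≤ a → a ≤ n - 1 → p.1.length = n.toNat →
      (∀ x : Int, (pvPopGE ls x p.2).headD n = pvScanR ls x n (a + 1)) →
      (∀ k : Nat, k < n.toNat →
        p.1.getD k 0 = if a < (k : Int) then pvScanR ls (PySem.List.pyGetD ls (k : Int) 0) n ((k : Int) + 1) else n) →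
      (((PySem.List.pyRange a (-1) (-1)).foldl (pvStackStep ls) p).1.length = n.toNat ∧
       ∀ k : Nat, k < n.toNat →
        (((PySem.List.pyRange a (-1) (-1)).foldl (pvStackStep ls) p).1).getD k 0
          = pvScanR ls (PySem.List.pyGetD ls (k : Int) 0) n ((k : Int) + 1)) := by
  intro d
  induction d with
  | zero =>
    intro a p hd ha0 han hl hS hp
    have : a = -1 := by omega
    subst this
    rw [PySem.List.pyRange_neg_one_eq_nil le_rfl]
    refine ⟨hl, ?_⟩
    intro k hk
    have := hp k hk
    rwa [if_pos (by omega : (-1 : Int) < (k : Int))] at this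
  | succ d ih =>
    intro a p hd ha0 han hl hS hp
    have ha0' : 0 ≤ a := by omega
    rw [PySem.List.pyRange_neg_one_cons (by omega : (-1 : Int) < a), List.foldl_cons]
    have hcast : ((a.toNat : Nat) : Int) = a := by omega
    apply ih (a - 1) _ (by omega) (by omega) (by omega)
    · simp only [pvStackStep]
      by_cases hemp : pvPopGE ls (PySem.List.pyGetD ls a 0) p.2 = []
      · rw [if_pos hemp]; exact hl
      · rw [if_neg hemp, PySem.List.length_pySetD]; exact hl
    · -- stack invariant at a (= (a - 1) + 1)
      intro x
      rw [show a - 1 + 1 = a by omega]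
      rw [pvScanR, if_pos (by omega : a < n)]
      simp only [pvStackStep]
      by_cases hxy : PySem.List.pyGetD ls a 0 ≥ x
      · rw [if_pos hxy]
        show (pvPopGE ls x (a :: pvPopGE ls (PySem.List.pyGetD ls a 0) p.2)).headD n = _
        rw [pvPopGE, if_pos hxy, pvPopGE_popGE ls hxy]
        exact hS x
      · rw [if_neg hxy]
        show (pvPopGE ls x (a :: pvPopGE ls (PySem.List.pyGetD ls a 0) p.2)).headD n = a
        rw [pvPopGE, if_neg hxy]
        rfl
    · -- array invariant
      intro k hk
      simp only [pvStackStep]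
      by_cases hemp : pvPopGE ls (PySem.List.pyGetD ls a 0) p.2 = []
      · rw [if_pos hemp]
        have hsc : pvScanR ls (PySem.List.pyGetD ls a 0) n (a + 1) = n := by
          rw [← hS (PySem.List.pyGetD ls a 0), hemp]; rfl
        by_cases hka : k = a.toNat
        · rw [hka]
          have := hp a.toNat (by omega)
          rw [if_neg (by omega : ¬ a < ((a.toNat : Nat) : Int))] at this
          rw [this, if_pos (by omega : a - 1 < ((a.toNat : Nat) : Int)),
            show ((a.toNat : Nat) : Int) + 1 = a + 1 by omega, hcast, hsc]
        · have := hp k hk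
          by_cases hka' : a < (k : Int)
          · rw [if_pos hka'] at this; rw [this, if_pos (by omega)]
          · rw [if_neg hka'] at this; rw [this, if_neg (by omega)]
      · rw [if_neg hemp, PySem.List.pySetD_of_nonneg _ _ ha0']
        have hkl : k < p.1.length := by omega
        by_cases hka : k = a.toNat
        · rw [hka]
          rw [List.getD_eq_getElem _ _ (by simp; omega), List.getElem_set, if_pos rfl,
            if_pos (by omega : a - 1 < ((a.toNat : Nat) : Int)),
            show ((a.toNat : Nat) : Int) + 1 = a + 1 by omega, hcast,
            pvHeadDNe hemp 0 n, hS (PySem.List.pyGetD ls a 0)]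
        · rw [List.getD_eq_getElem _ _ (by simpa [List.length_set] using hkl), List.getElem_set,
            if_neg (by omega)]
          have := hp k hk
          rw [List.getD_eq_getElem _ _ hkl] at this
          rw [this]
          by_cases hka' : a < (k : Int)
          · rw [if_pos hka', if_pos (by omega)]
          · rw [if_neg hka', if_neg (by omega)]

lemma pvMaxIte (m c : Int) : max m c = if c > m then c else m := by
  simp only [max_def]
  split_ifs <;> omega

-- ===== VERDICT (by name: the statement is the Claim_ definition above) =====
theorem max_sum_times_min_spec : Claim_equal_max_sum_times_min := by
  intro n ls _hdom hpre
  obtain ⟨h1, h2⟩ := hpre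
  unfold Spec_max_sum_times_min
  simp only [max_sum_times_min, max_sum_times_min_alt]
  rw [show (fun (st : List Int × List Int) (i : Int) =>
        (if pvPopGE ls (PySem.List.pyGetD ls i 0) st.2 = [] then st.1
         else PySem.List.pySetD st.1 i ((pvPopGE ls (PySem.List.pyGetD ls i 0) st.2).headD 0),
         i :: pvPopGE ls (PySem.List.pyGetD ls i 0) st.2)) = pvStackStep ls from rfl]
  have h2' : n ≤ (ls.length : Int) := by exact_mod_cast h2
  have hN0 : (0 : Int) ≤ n := by omega
  -- A's prefix sums
  have hA := pvPrePass ls n h2' (n - 1).toNat 1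
      (PySem.List.pySetD (List.replicate n.toNat 0) 0 (PySem.List.pyGetD ls 0 0))
      (by omega) le_rfl h1
      (by rw [PySem.List.length_pySetD, List.length_replicate])
      (by
        intro k hk
        rw [PySem.List.pySetD_of_nonneg _ _ le_rfl]
        simp only [Int.toNat_zero]
        by_cases hk0 : k = 0
        · rw [hk0, List.getD_eq_getElem _ _ (by simp; omega), List.getElem_set, if_pos rfl,
            if_pos (by omega : ((0 : Nat) : Int) < 1),
            PySem.List.pyGetD_of_nonneg _ _ le_rfl]
          simp only [Int.toNat_zero]
          rw [pvTakeSuccSum ls 0 (by omega)]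
          simp
        · rw [List.getD_eq_getElem _ _ (by simp; omega), List.getElem_set, if_neg (by omega),
            List.getElem_replicate, if_neg (by omega : ¬ ((k : Nat) : Int) < 1)])
  have hpreA := pvListEqMapRange _ (fun k => (ls.take (k + 1)).sum) hA.1 hA.2
  rw [hpreA]
  -- B's prefix sums
  have hpreB : ((PySem.List.slice ls none (some n)).foldl
      (fun (st : List Int × Int) v => (st.1 ++ [st.2 + v], st.2 + v)) (([] : List Int), 0)).1
      = (List.range n.toNat).map (fun k => (ls.take (k + 1)).sum) := by
    rw [PySem.List.slice_to ls hN0, pvFoldB]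
    simp only [List.nil_append]
    rw [show (ls.take n.toNat).length = n.toNat by simp; omega]
    apply List.map_congr_left
    intro k hk
    rw [List.mem_range] at hk
    rw [List.take_take, Nat.min_eq_left (by omega), zero_add]
  rw [hpreB]
  -- the stack passes
  have hLp := pvLeftPass ls n n.toNat 0 (List.replicate n.toNat (-1), ([] : List Int))
      (by omega) le_rfl hN0 (by simp)
      (by intro x; simp [pvPopGE, pvScanL])
      (by
        intro k hk
        show (List.replicate n.toNat (-1 : Int)).getD k 0 = _
        rw [List.getD_replicate _ hk, if_neg (by omega : ¬ ((k : Nat) : Int) < 0)])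
  have hLeft := pvListEqMapRange _ (fun k => pvScanL ls (PySem.List.pyGetD ls (k : Int) 0) k) hLp.1 hLp.2
  rw [hLeft]
  have hRp := pvRightPass ls n n.toNat (n - 1) (List.replicate n.toNat n, ([] : List Int))
      (by omega) (by omega) (by omega) (by simp)
      (by
        intro x
        rw [show n - 1 + 1 = n from by omega, pvScanR, if_neg (by omega : ¬ n < n)]
        simp [pvPopGE])
      (by
        intro k hk
        show (List.replicate n.toNat n).getD k 0 = _
        rw [List.getD_replicate _ hk, if_neg (by omega : ¬ n - 1 < ((k : Nat) : Int))])
  have hRight := pvListEqMapRange _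
      (fun k => pvScanR ls (PySem.List.pyGetD ls (k : Int) 0) n ((k : Int) + 1)) hRp.1 hRp.2
  rw [hRight]
  -- the combining loops agree pointwise
  refine congrArg (fun o : Option Int => o.getD 0) (PySem.List.foldl_congr_mem _ _ _ _ ?_)
  intro acc i hi
  rw [PySem.List.mem_pyRange_one] at hi
  have hi0 : (0 : Int) ≤ i := hi.1
  have hiN : i.toNat < n.toNat := by omega
  have hcast : ((i.toNat : Nat) : Int) = i := by omega
  have hLr : PySem.List.pyGetD
      ((List.range n.toNat).map (fun (k : Nat) => pvScanL ls (PySem.List.pyGetD ls (k : Int) 0) k)) i 0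
      = pvScanL ls (PySem.List.pyGetD ls i 0) i.toNat := by
    rw [PySem.List.pyGetD_of_nonneg _ _ hi0, PySem.List.getD_map_range _ _ _ _ hiN, hcast]
  have hRr : PySem.List.pyGetD
      ((List.range n.toNat).map (fun (k : Nat) => pvScanR ls (PySem.List.pyGetD ls (k : Int) 0) n ((k : Int) + 1))) i 0
      = pvScanR ls (PySem.List.pyGetD ls i 0) n (i + 1) := by
    rw [PySem.List.pyGetD_of_nonneg _ _ hi0, PySem.List.getD_map_range _ _ _ _ hiN, hcast]
  rw [hLr, hRr]
  rcases pvScanL_sign ls (PySem.List.pyGetD ls i 0) i.toNat with hneg | hpos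
  · rw [hneg, if_pos rfl, if_neg (by decide : ¬ (-1 : Int) ≥ 0), sub_zero]
    cases acc with
    | none => rfl
    | some m => simp only [pvMaxIte]
  · have hne : ¬ pvScanL ls (PySem.List.pyGetD ls i 0) i.toNat = -1 := by omega
    rw [if_neg hne, if_pos hpos]
    cases acc with
    | none => rfl
    | some m => simp only [pvMaxIte]
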